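-- pv_equiv track=rewrite | github.com/mmmdip-uga/lab-8 | src/id3.py | _partition_by
-- ===== SOURCE A (Python) =====
-- def _partition_by(X, y, attribute):
--     partitions = {}
--     for xi, yi in zip(X, y):
--         key = xi[attribute]
--         if key not in partitions:
--             partitions[key] = ([], [])
--         partitions[key][0].append(xi)
--         partitions[key][1].append(yi)
--     return partitions
-- ===== SOURCE B (Python) =====
-- def _partition_by(X, y, attribute):
--     pairs = list(zip(X, y))
--     keys = list(dict.fromkeys(xi[attribute] for xi, _ in pairs))
--     return {k: ([xi for xi, yi in pairs if xi[attribute] == k],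
--                 [yi for xi, yi in pairs if xi[attribute] == k])
--             for k in keys}
-- ===== Notes on version B (the rewrite author's own statement) =====
-- stated objective: alternative
-- what changed: Replaces the single streaming pass that mutates per-key bucket lists in a dict with a two-phase group-by: first collect the distinct attribute values in first-appearance order, then build each bucket by filtering the zipped (X, y) pairs per key with comprehensions.
import Mathlib
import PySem

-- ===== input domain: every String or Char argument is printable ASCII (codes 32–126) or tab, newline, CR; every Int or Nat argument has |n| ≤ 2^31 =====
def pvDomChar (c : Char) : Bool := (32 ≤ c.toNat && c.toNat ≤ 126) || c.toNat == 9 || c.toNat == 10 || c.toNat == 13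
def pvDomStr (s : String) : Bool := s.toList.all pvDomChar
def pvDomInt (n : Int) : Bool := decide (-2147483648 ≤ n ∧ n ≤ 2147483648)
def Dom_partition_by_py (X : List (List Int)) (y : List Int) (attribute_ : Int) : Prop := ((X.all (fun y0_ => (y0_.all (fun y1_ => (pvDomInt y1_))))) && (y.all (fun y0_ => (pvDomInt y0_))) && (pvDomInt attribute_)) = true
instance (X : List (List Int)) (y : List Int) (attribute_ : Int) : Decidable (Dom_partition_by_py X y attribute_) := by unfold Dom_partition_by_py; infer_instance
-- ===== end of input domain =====

-- B replaces A's single streaming dict-mutating pass with a two-phase group-by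
-- (distinct keys in first-appearance order, then one filtering scan per key): an
-- alternative decomposition of the same partitioning, not claimed faster.


-- ===== PORT A =====
-- literal port of A: one pass over zip(X, y), buckets grown in a dict
-- (the in-place list appends become Dict.modify with the same appends);
-- xi[attribute] is PySem.List.pyGetD, exact under Pre_ (index in range).
def partition_by_py (X : List (List Int)) (y : List Int) (attribute_ : Int) : List (Int × List (List Int) × List Int) :=
  ((X.zip y).foldl
    (fun (partitions : PySem.Dict Int (List (List Int) × List Int)) p =>
      let key := PySem.List.pyGetD p.1 attribute_ 0
      let partitions := if partitions.contains key then partitions else partitions.insert key ([], [])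
      partitions.modify key ([], []) (fun b => (b.1 ++ [p.1], b.2 ++ [p.2])))
    PySem.Dict.empty).items

-- ===== PORT B =====
-- literal port of Source B: distinct keys first (dict.fromkeys = PySem.List.dedup),
-- then per-key filtering comprehensions over the zipped pairs.
def partition_by_py_alt (X : List (List Int)) (y : List Int) (attribute_ : Int) : List (Int × List (List Int) × List Int) :=
  let pairs := X.zip y
  let keys := PySem.List.dedup (pairs.map (fun p => PySem.List.pyGetD p.1 attribute_ 0))
  keys.map (fun k =>
    (k, ((pairs.filter (fun p => PySem.List.pyGetD p.1 attribute_ 0 == k)).map Prod.fst,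
         (pairs.filter (fun p => PySem.List.pyGetD p.1 attribute_ 0 == k)).map Prod.snd)))

-- ===== PRECONDITION & SPEC =====
-- Pre_ excludes exactly the inputs where A raises IndexError: some zipped row xi
-- has xi[attribute] out of range (Python negative indexing allowed).
def Pre_partition_by_py (X : List (List Int)) (y : List Int) (attribute_ : Int) : Prop :=
  ∀ p ∈ X.zip y, PySem.Raise.InRange p.1.length attribute_
instance (X : List (List Int)) (y : List Int) (attribute_ : Int) : Decidable (Pre_partition_by_py X y attribute_) := by unfold Pre_partition_by_py; infer_instance
def pvWitness_partition_by_py : List (List Int) × List Int × Int := ([[1, 2], [3, 2], [1, 5]], [0, 1, 0], 0)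
def Spec_partition_by_py (X : List (List Int)) (y : List Int) (attribute_ : Int) (out : List (Int × List (List Int) × List Int)) : Prop := out = partition_by_py_alt X y attribute_
instance (X : List (List Int)) (y : List Int) (attribute_ : Int) (out : List (Int × List (List Int) × List Int)) : Decidable (Spec_partition_by_py X y attribute_ out) := by unfold Spec_partition_by_py; infer_instance

-- ===== CLAIM (what is proved, stated in full; the proofs are below) =====
def Claim_equal_partition_by_py : Prop := ∀ (X : List (List Int)) (y : List Int) (attribute_ : Int), Dom_partition_by_py X y attribute_ → Pre_partition_by_py X y attribute_ → Spec_partition_by_py X y attribute_ (partition_by_py X y attribute_)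

-- ===== LEMMAS AND PROOFS =====

-- proof-side names for the two programs' building blocks
def pvKey (a : Int) (p : List Int × Int) : Int := PySem.List.pyGetD p.1 a 0

def pvStep (a : Int) (d : PySem.Dict Int (List (List Int) × List Int)) (p : List Int × Int) : PySem.Dict Int (List (List Int) × List Int) :=
  let key := PySem.List.pyGetD p.1 a 0
  let d := if d.contains key then d else d.insert key ([], [])
  d.modify key ([], []) (fun b => (b.1 ++ [p.1], b.2 ++ [p.2]))

def pvGroup (a : Int) (L : List (List Int × Int)) : List (Int × List (List Int) × List Int) :=
  (PySem.List.dedup (L.map (pvKey a))).map (fun k =>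
    (k, ((L.filter (fun p => pvKey a p == k)).map Prod.fst,
         (L.filter (fun p => pvKey a p == k)).map Prod.snd)))

lemma pv_portA_eq (X : List (List Int)) (y : List Int) (a : Int) :
    partition_by_py X y a = ((X.zip y).foldl (pvStep a) PySem.Dict.empty).items := rfl

lemma pv_portB_eq (X : List (List Int)) (y : List Int) (a : Int) :
    partition_by_py_alt X y a = pvGroup a (X.zip y) := rfl

lemma pv_dedup_append_singleton {α : Type} [BEq α] [LawfulBEq α] (xs : List α) (x : α) :
    PySem.List.dedup (xs ++ [x]) = if x ∈ xs then PySem.List.dedup xs else PySem.List.dedup xs ++ [x] := by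
  have h : PySem.List.dedup (xs ++ [x]) = PySem.Set.add (PySem.List.dedup xs) x := by
    simp [PySem.List.dedup, PySem.Set.ofList, List.foldl_append]
  rw [h]
  unfold PySem.Set.add
  by_cases hx : x ∈ xs
  · simp [PySem.Set.contains, hx]
  · simp [PySem.Set.contains, hx]

lemma pv_main (a : Int) (L : List (List Int × Int)) :
    ((L.foldl (pvStep a) PySem.Dict.empty).items) = pvGroup a L := by
  induction L using List.reverseRecOn with
  | nil => rfl
  | append_singleton L p ih =>
    rw [List.foldl_append, List.foldl_cons, List.foldl_nil]
    have hitems : (L.foldl (pvStep a) PySem.Dict.empty).items = pvGroup a L := ih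
    set D := L.foldl (pvStep a) PySem.Dict.empty with hD
    have hkeys : D.keys = PySem.List.dedup (L.map (pvKey a)) := by
      rw [PySem.Dict.keys, hitems]
      unfold pvGroup
      rw [List.map_map]
      simp [Function.comp_def]
    have hnodup : D.keys.Nodup := by rw [hkeys]; exact PySem.List.nodup_dedup _
    have hcont : D.contains (pvKey a p) = decide (pvKey a p ∈ L.map (pvKey a)) := by
      rw [PySem.Dict.contains_eq_decide_mem_keys, hkeys]
      simp
    by_cases hk : pvKey a p ∈ L.map (pvKey a)
    · have hc : D.contains (pvKey a p) = true := by rw [hcont]; simpa using hk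
      have hmem : ((pvKey a p), ((L.filter (fun q => pvKey a q == pvKey a p)).map Prod.fst,
          (L.filter (fun q => pvKey a q == pvKey a p)).map Prod.snd)) ∈ D.items := by
        rw [hitems]
        exact List.mem_map.mpr ⟨pvKey a p, (PySem.List.mem_dedup _ _).mpr hk, rfl⟩
      have hget := PySem.Dict.getD_of_mem_items D hmem hnodup (([], []) : List (List Int) × List Int)
      have hstep : pvStep a D p = D.insert (pvKey a p)
          ((L.filter (fun q => pvKey a q == pvKey a p)).map Prod.fst ++ [p.1],
           (L.filter (fun q => pvKey a q == pvKey a p)).map Prod.snd ++ [p.2]) := by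
        have e1 : pvStep a D p = (if D.contains (pvKey a p) then D else D.insert (pvKey a p) ([], [])).modify (pvKey a p) ([], []) (fun b => (b.1 ++ [p.1], b.2 ++ [p.2])) := rfl
        rw [e1, hc, if_pos rfl]
        unfold PySem.Dict.modify
        rw [hget]
      rw [hstep, PySem.Dict.items_insert_of_contains D _ hc, hitems]
      unfold pvGroup
      rw [List.map_append, List.map_cons, List.map_nil, pv_dedup_append_singleton, if_pos hk, List.map_map]
      apply List.map_congr_left
      intro k' hk'
      by_cases hkk : k' = pvKey a p
      · subst hkk
        simp [List.filter_append]
      · simp [List.filter_append, hkk, Ne.symm hkk, beq_iff_eq]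
    · have hc : D.contains (pvKey a p) = false := by rw [hcont]; simpa using hk
      have hstep : pvStep a D p = D.insert (pvKey a p) ([p.1], [p.2]) := by
        have e1 : pvStep a D p = (if D.contains (pvKey a p) then D else D.insert (pvKey a p) ([], [])).modify (pvKey a p) ([], []) (fun b => (b.1 ++ [p.1], b.2 ++ [p.2])) := rfl
        rw [e1, hc]
        simp only [Bool.false_eq_true, if_false]
        unfold PySem.Dict.modify
        rw [PySem.Dict.getD_insert_self, PySem.Dict.insert_insert_self]
        rfl
      have hc' : D.contains (pvKey a p) = false := hc
      rw [hstep, PySem.Dict.items_insert_of_not_contains D _ hc', hitems]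
      unfold pvGroup
      rw [List.map_append, List.map_cons, List.map_nil, pv_dedup_append_singleton, if_neg hk, List.map_append]
      congr 1
      · apply List.map_congr_left
        intro k' hk'
        have hk'mem : k' ∈ L.map (pvKey a) := (PySem.List.mem_dedup _ _).mp hk'
        have hne : pvKey a p ≠ k' := fun h => hk (h ▸ hk'mem)
        simp [List.filter_append, hne, beq_iff_eq]
      · have hfil : L.filter (fun q => pvKey a q == pvKey a p) = [] := by
          rw [List.filter_eq_nil_iff]
          intro q hq hbeq
          exact hk (List.mem_map.mpr ⟨q, hq, (beq_iff_eq.mp hbeq)⟩)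
        simp [List.filter_append, hfil]

-- ===== VERDICT (by name: the statement is the Claim_ definition above) =====
theorem partition_by_py_spec : Claim_equal_partition_by_py := by
  intro X y a _ _
  unfold Spec_partition_by_py
  rw [pv_portA_eq, pv_main, ← pv_portB_eq]
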